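-- pv_equiv track=rewrite | github.com/MolecularNeurobiology/Breathe_Easy | scripts/pneumo_python_module.py | get_the_biggest_chunk
-- ===== SOURCE A (Python) =====
-- def get_the_biggest_chunk(chunk_list):
--     """
--         Parameters
--     ----------
--     chunk_list : list of tuples of Ints (or Floats)
--         list of Tuples of Ints describing indexes of selections
--
--     Returns
--     -------
--     biggest_chunk : Tuple of Ints (or Floats)
--         Tuple describing the boundary of the largest 'chunk' in the chunk_list
--
--     """
--     biggest_chunk = []
--     if len(chunk_list) == 0:
--         return biggest_chunk
--
--     biggest_chunk_size = 0
--
--     for c in chunk_list: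
--         if c[1]-c[0] > biggest_chunk_size:
--             biggest_chunk = [c]
--             biggest_chunk_size = c[1]-c[0]
--     return biggest_chunk
-- ===== SOURCE B (Python) =====
-- def get_the_biggest_chunk(chunk_list):
--     spans = [c[1] - c[0] for c in chunk_list]
--     best = max(spans, default=0)
--     if best <= 0:
--         return []
--     for c in chunk_list:
--         if c[1] - c[0] == best:
--             return [c]
-- ===== Notes on version B (the rewrite author's own statement) =====
-- stated objective: simpler
-- what changed: Replaces the fused scan that tracks both the best tuple and the best size with a reduce (max span, default 0) followed by a separate first-match locate pass; first-among-ties and the strictly-positive threshold are preserved.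
import Mathlib
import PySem

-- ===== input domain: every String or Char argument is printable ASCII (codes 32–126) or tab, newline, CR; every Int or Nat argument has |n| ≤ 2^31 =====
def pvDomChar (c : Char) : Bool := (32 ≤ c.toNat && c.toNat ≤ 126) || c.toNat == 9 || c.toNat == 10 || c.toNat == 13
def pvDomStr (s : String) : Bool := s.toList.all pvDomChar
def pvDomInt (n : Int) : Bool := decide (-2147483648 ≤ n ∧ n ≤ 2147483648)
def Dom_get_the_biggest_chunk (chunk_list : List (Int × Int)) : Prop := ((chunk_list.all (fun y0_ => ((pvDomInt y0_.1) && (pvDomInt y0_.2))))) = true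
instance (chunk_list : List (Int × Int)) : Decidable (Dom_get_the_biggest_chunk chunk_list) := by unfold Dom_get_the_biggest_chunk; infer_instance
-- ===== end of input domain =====

-- B splits A's fused scan-and-track loop into a reduce (max span, default 0) plus a separate
-- first-match locate pass; same return value everywhere (objective: simpler decomposition).

-- ===== PORT A =====
def get_the_biggest_chunk (chunk_list : List (Int × Int)) : List (Int × Int) :=
  -- biggest_chunk = []; if len == 0: return it; then the tracking loop over (biggest_chunk, size)
  if chunk_list.length = 0 then []
  else
    (chunk_list.foldl
      (fun (st : List (Int × Int) × Int) c =>
        if c.2 - c.1 > st.2 then ([c], c.2 - c.1) else st)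
      ([], 0)).1

-- ===== PORT B =====
def get_the_biggest_chunk_alt (chunk_list : List (Int × Int)) : List (Int × Int) :=
  let spans := chunk_list.map (fun c => c.2 - c.1)
  let best := match PySem.List.max? spans (fun x => x) with   -- max(spans, default=0)
    | none => 0
    | some m => m
  if best ≤ 0 then []
  else
    match chunk_list.find? (fun c => c.2 - c.1 == best) with  -- the locate loop with early return
    | some c => [c]
    | none => []   -- unreachable: best is the span of some element

-- ===== PRECONDITION & SPEC =====
def Spec_get_the_biggest_chunk (chunk_list : List (Int × Int)) (out : List (Int × Int)) : Prop := out = get_the_biggest_chunk_alt chunk_list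
instance (chunk_list : List (Int × Int)) (out : List (Int × Int)) : Decidable (Spec_get_the_biggest_chunk chunk_list out) := by unfold Spec_get_the_biggest_chunk; infer_instance

-- ===== CLAIM (what is proved, stated in full; the proofs are below) =====
def Claim_equal_get_the_biggest_chunk : Prop := ∀ (chunk_list : List (Int × Int)), Dom_get_the_biggest_chunk chunk_list → Spec_get_the_biggest_chunk chunk_list (get_the_biggest_chunk chunk_list)

-- ===== LEMMAS AND PROOFS =====

-- running maximum of spans, seeded with s (the ".2" component of A's loop state)
def pvM (l : List (Int × Int)) (s : Int) : Int :=
  l.foldl (fun m c => max m (c.2 - c.1)) s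

theorem pvM_nil (s : Int) : pvM [] s = s := rfl

theorem pvM_cons (c : Int × Int) (l : List (Int × Int)) (s : Int) :
    pvM (c :: l) s = pvM l (max s (c.2 - c.1)) := rfl

theorem le_pvM (l : List (Int × Int)) (s : Int) : s ≤ pvM l s := by
  induction l generalizing s with
  | nil => exact le_refl s
  | cons c t ih =>
    rw [pvM_cons]
    exact le_trans (le_max_left _ _) (ih _)

theorem pvM_max (l : List (Int × Int)) (s t : Int) :
    pvM l (max s t) = max (pvM l s) t := by
  induction l generalizing s with
  | nil => rfl
  | cons c u ih =>
    rw [pvM_cons, pvM_cons, max_right_comm, ih]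

theorem pvM_map_foldl (l : List (Int × Int)) (s : Int) :
    (l.map (fun c => c.2 - c.1)).foldl max s = pvM l s := by
  induction l generalizing s with
  | nil => rfl
  | cons c t ih => simpa [pvM_cons] using ih (max s (c.2 - c.1))

theorem find_pvM_some (l : List (Int × Int)) (s : Int) (h : s < pvM l s) :
    ∃ c, l.find? (fun c => c.2 - c.1 == pvM l s) = some c := by
  induction l generalizing s with
  | nil => exact absurd h (by simp [pvM_nil])
  | cons c t ih =>
    rw [pvM_cons] at h ⊢
    by_cases hc : c.2 - c.1 = pvM t (max s (c.2 - c.1))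
    · exact ⟨c, by
        have hb : (c.2 - c.1 == pvM t (max s (c.2 - c.1))) = true := beq_iff_eq.mpr hc
        simp [List.find?, hb]⟩
    · have hne : max s (c.2 - c.1) ≠ pvM t (max s (c.2 - c.1)) := by
        rcases max_cases s (c.2 - c.1) with ⟨he, _⟩ | ⟨he, _⟩
        · rw [he] at h ⊢; intro h'; rw [← h'] at h; exact lt_irrefl _ h
        · rw [he] at hc ⊢; exact hc
      obtain ⟨c', hc'⟩ := ih _ (lt_of_le_of_ne (le_pvM t _) hne)
      have hb : (c.2 - c.1 == pvM t (max s (c.2 - c.1))) = false := beq_eq_false_iff_ne.mpr hc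
      exact ⟨c', by simp [List.find?, hb, hc']⟩

theorem foldl_fst (l : List (Int × Int)) (acc : List (Int × Int)) (s : Int) :
    (l.foldl
      (fun (st : List (Int × Int) × Int) c =>
        if c.2 - c.1 > st.2 then ([c], c.2 - c.1) else st)
      (acc, s)).1
    = if pvM l s ≤ s then acc
      else match l.find? (fun c => c.2 - c.1 == pvM l s) with
        | some c => [c]
        | none => acc := by
  induction l generalizing acc s with
  | nil => simp [pvM_nil]
  | cons c t ih =>
    rw [List.foldl_cons]
    by_cases h : c.2 - c.1 > s
    · have hm : pvM (c :: t) s = pvM t (c.2 - c.1) := by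
        rw [pvM_cons, max_eq_right (le_of_lt h)]
      simp only [if_pos h, ih]
      rw [hm, if_neg (not_le_of_gt (lt_of_lt_of_le h (le_pvM _ _)))]
      by_cases hc : c.2 - c.1 = pvM t (c.2 - c.1)
      · rw [if_pos (le_of_eq hc.symm)]
        have hb : (c.2 - c.1 == pvM t (c.2 - c.1)) = true := beq_iff_eq.mpr hc
        simp [List.find?, hb]
      · have hlt : c.2 - c.1 < pvM t (c.2 - c.1) := lt_of_le_of_ne (le_pvM _ _) hc
        rw [if_neg (not_le_of_gt hlt)]
        obtain ⟨c', hc'⟩ := find_pvM_some t (c.2 - c.1) hlt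
        have hb : (c.2 - c.1 == pvM t (c.2 - c.1)) = false := beq_eq_false_iff_ne.mpr hc
        simp [List.find?, hb, hc']
    · have hm : pvM (c :: t) s = pvM t s := by
        rw [pvM_cons, max_eq_left (le_of_not_gt h)]
      simp only [if_neg h, ih]
      rw [hm]
      by_cases hle : pvM t s ≤ s
      · rw [if_pos hle, if_pos hle]
      · rw [if_neg hle, if_neg hle]
        have hb : (c.2 - c.1 == pvM t s) = false :=
          beq_eq_false_iff_ne.mpr (fun he => hle (he ▸ le_of_not_gt h))
        simp [List.find?, hb]

-- ===== VERDICT (by name: the statement is the Claim_ definition above) =====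
theorem get_the_biggest_chunk_spec : Claim_equal_get_the_biggest_chunk := by
  intro l _
  unfold Spec_get_the_biggest_chunk get_the_biggest_chunk get_the_biggest_chunk_alt
  cases l with
  | nil => rfl
  | cons c t =>
    simp only [List.length_cons, List.map_cons, PySem.List.max?_id_cons, pvM_map_foldl,
      Nat.succ_ne_zero, if_false, foldl_fst]
    have hM : pvM (c :: t) 0 = max (pvM t (c.2 - c.1)) 0 := by
      rw [pvM_cons, max_comm (0 : Int), pvM_max]
    by_cases hb : pvM t (c.2 - c.1) ≤ 0
    · rw [if_pos hb, if_pos (by rw [hM]; exact max_le hb (le_refl 0))]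
    · have hbe : max (pvM t (c.2 - c.1)) 0 = pvM t (c.2 - c.1) :=
        max_eq_left (le_of_lt (lt_of_not_ge hb))
      rw [if_neg hb, if_neg (by rw [hM, hbe]; exact hb), hM, hbe]
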